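-- pv_equiv track=rewrite | github.com/AlexGascon/Advent-of-Code | Day-9/part_2.py | remove_ignores
-- ===== SOURCE A (Python) =====
-- def remove_ignores(stream):
--     new_stream = ""
--
--     ignored = False
--     for character in stream:
--         if character == '!' and not ignored:
--             ignored = True
--
--         elif ignored:
--             ignored = False
--
--         else:
--             new_stream += character
--             ignored = False
--
--     return new_stream
-- ===== SOURCE B (Python) =====
-- def remove_ignores(stream):
--     result = []
--     i = 0
--     n = len(stream)
--     while i < n:
--         if stream[i] == '!':
--             i += 2
--         else:
--             result.append(stream[i])
--             i += 1
--     return ''.join(result)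
-- ===== Notes on version B (the rewrite author's own statement) =====
-- stated objective: simpler
-- what changed: Replaces the carried boolean flag state with an index-driven while loop that skips two positions on an escape character and one otherwise, appending kept characters to a list joined once at the end.
import Mathlib
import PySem

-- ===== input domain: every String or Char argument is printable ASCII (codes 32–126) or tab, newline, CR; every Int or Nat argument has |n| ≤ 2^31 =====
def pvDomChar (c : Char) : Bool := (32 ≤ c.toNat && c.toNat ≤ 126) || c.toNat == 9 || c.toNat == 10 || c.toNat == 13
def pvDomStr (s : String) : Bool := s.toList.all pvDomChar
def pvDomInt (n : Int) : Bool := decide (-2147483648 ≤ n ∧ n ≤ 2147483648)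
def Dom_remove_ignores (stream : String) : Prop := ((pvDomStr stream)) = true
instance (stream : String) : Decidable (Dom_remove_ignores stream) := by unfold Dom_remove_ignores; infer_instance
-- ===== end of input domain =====

-- B: index-skipping loop (advance 2 on the escape char, keep 1 otherwise) instead of a carried boolean flag; same O(n) cost, simpler state.

-- ===== PORT A =====
-- the loop body: state = (new_stream as chars, ignored flag)
def pvStepA (st : List Char × Bool) (character : Char) : List Char × Bool :=
  if character = '!' ∧ st.2 = false then (st.1, true)
  else if st.2 = true then (st.1, false)
  else (st.1 ++ [character], false)

def remove_ignores (stream : String) : String :=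
  String.ofList (stream.toList.foldl pvStepA ([], false)).1

-- ===== PORT B =====
-- index-jump loop of Source B as structural recursion: '!' consumes two chars, anything else is kept
def pvGoB : List Char → List Char
  | [] => []
  | [c] => if c = '!' then [] else [c]
  | c :: d :: rest => if c = '!' then pvGoB rest else c :: pvGoB (d :: rest)

def remove_ignores_alt (stream : String) : String :=
  String.ofList (pvGoB stream.toList)

-- ===== PRECONDITION & SPEC =====
def Spec_remove_ignores (stream : String) (out : String) : Prop := out = remove_ignores_alt stream
instance (stream : String) (out : String) : Decidable (Spec_remove_ignores stream out) := by unfold Spec_remove_ignores; infer_instance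

-- ===== CLAIM (what is proved, stated in full; the proofs are below) =====
def Claim_equal_remove_ignores : Prop := ∀ (stream : String), Dom_remove_ignores stream → Spec_remove_ignores stream (remove_ignores stream)

-- ===== LEMMAS AND PROOFS =====
theorem foldA_eq_goB (cs : List Char) : ∀ acc : List Char,
    (cs.foldl pvStepA (acc, false)).1 = acc ++ pvGoB cs := by
  induction cs using pvGoB.induct with
  | case1 => intro acc; simp [pvGoB]
  | case2 => intro acc; simp [pvGoB, pvStepA, List.foldl]
  | case3 c h => intro acc; simp [pvGoB, pvStepA, h, List.foldl]
  | case4 d rest ih =>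
      intro acc
      simpa [pvGoB, pvStepA, List.foldl] using ih acc
  | case5 c d rest h ih =>
      intro acc
      have := ih (acc ++ [c])
      simp [pvGoB, pvStepA, h, List.foldl] at this ⊢
      simp [this]

-- ===== VERDICT (by name: the statement is the Claim_ definition above) =====
theorem remove_ignores_spec : Claim_equal_remove_ignores := by
  intro stream _
  unfold Spec_remove_ignores remove_ignores remove_ignores_alt
  rw [foldA_eq_goB]
  simp
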